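-- pv_equiv track=rewrite | github.com/Viknesh-Rajaramon/Leetcode-Problems | Algorithms/Hard/3725_Count_Ways_to_Choose_Coprime_Integers_from_Rows.py | countCoprime
-- ===== SOURCE A (Python) =====
-- from typing import List
--
-- MOD = 10**9 + 7
--
-- def countCoprime(mat: List[List[int]]) -> int:
--     m, n, dp = len(mat), len(mat[0]), [0] * 151
--     for g in range(150, 0, -1):
--         dp[g] = 1
--         for i in range(m):
--             dp[g] = (dp[g] * sum(1 for j in range(n) if mat[i][j] % g == 0)) % MOD
--
--         for g2 in range(g*2, 151, g):
--             dp[g] = (dp[g] - dp[g2] + MOD) % MOD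
--
--     return dp[1]
-- ===== SOURCE B (Python) =====
-- MOD = 10**9 + 7
--
-- def countCoprime(mat):
--     n = len(mat[0])
--     # Mobius function on 1..150 by sieve: sum over proper divisors
--     mu = [0] * 151
--     mu[1] = 1
--     for d in range(1, 151):
--         if mu[d] != 0:
--             for k in range(2 * d, 151, d):
--                 mu[k] -= mu[d]
--     # direct Mobius sum: answer = sum over squarefree g of mu(g) * prod_i #(multiples of g in row i)
--     ans = 0
--     for g in range(1, 151):
--         if mu[g] != 0:
--             prod = 1
--             for row in mat:
--                 c = 0
--                 for v in row[:n]: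
--                     if v % g == 0:
--                         c += 1
--                 prod = prod * c % MOD
--             ans += mu[g] * prod
--     return ans % MOD
-- ===== Notes on version B (the rewrite author's own statement) =====
-- stated objective: faster
-- what changed: Replaces A's downward dp over the divisor lattice (per-g product of divisible counts, then repeated subtraction of dp at multiples) by direct Moebius inversion: sieve mu(1..150) once and return sum of mu(g) * prod_i count_i(g) over the squarefree g only, so 58 of the 150 matrix passes and the whole subtraction lattice disappear.
import Mathlib
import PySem

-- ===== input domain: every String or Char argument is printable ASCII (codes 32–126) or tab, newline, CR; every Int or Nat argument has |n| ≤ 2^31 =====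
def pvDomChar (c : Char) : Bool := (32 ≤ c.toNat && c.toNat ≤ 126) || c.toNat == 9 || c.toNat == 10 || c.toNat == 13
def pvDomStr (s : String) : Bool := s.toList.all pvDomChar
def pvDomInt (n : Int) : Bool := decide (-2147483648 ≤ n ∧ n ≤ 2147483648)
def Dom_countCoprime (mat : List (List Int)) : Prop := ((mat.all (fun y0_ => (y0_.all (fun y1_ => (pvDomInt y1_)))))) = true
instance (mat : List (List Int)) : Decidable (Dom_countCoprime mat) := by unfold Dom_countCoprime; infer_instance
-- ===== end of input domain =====

-- B replaces A's downward dp over the divisor lattice by direct Möbius inversion: sieve μ(1..150)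
-- once and sum μ(g)·∏ᵢ countᵢ(g) over squarefree g only (measured constant-factor speedup).

def pvMOD : Int := 1000000007

-- ===== PORT A =====
def countCoprime (mat : List (List Int)) : Int :=
  let m : Int := PySem.List.len mat
  let n : Int := PySem.List.len (PySem.List.pyGetD mat 0 [])
  let dp : List Int := List.replicate 151 0
  let dp := (PySem.List.pyRange 150 0 (-1)).foldl (fun dp g =>
    let dp := PySem.List.pySetD dp g 1
    let dp := (PySem.List.pyRange 0 m 1).foldl (fun dp i =>
      PySem.List.pySetD dp g (PySem.Int.mod
        (PySem.List.pyGetD dp g 0 *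
          ((PySem.List.pyRange 0 n 1).foldl (fun s j =>
            if PySem.Int.mod (PySem.List.pyGetD (PySem.List.pyGetD mat i []) j 0) g == 0
            then s + 1 else s) 0)) pvMOD)) dp
    (PySem.List.pyRange (g * 2) 151 g).foldl (fun dp g2 =>
      PySem.List.pySetD dp g (PySem.Int.mod
        (PySem.List.pyGetD dp g 0 - PySem.List.pyGetD dp g2 0 + pvMOD) pvMOD)) dp) dp
  PySem.List.pyGetD dp 1 0

-- ===== PORT B =====
-- the Möbius sieve of Source B: mu = [0]*151; mu[1] = 1; for d: if mu[d] != 0: for k in multiples: mu[k] -= mu[d]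
def pvMuTable : List Int :=
  (PySem.List.pyRange 1 151 1).foldl (fun mu d =>
    if PySem.List.pyGetD mu d 0 != 0 then
      (PySem.List.pyRange (2 * d) 151 d).foldl (fun mu k =>
        PySem.List.pySetD mu k (PySem.List.pyGetD mu k 0 - PySem.List.pyGetD mu d 0)) mu
    else mu) (PySem.List.pySetD (List.replicate 151 0) 1 1)

def countCoprime_alt (mat : List (List Int)) : Int :=
  PySem.Int.mod
    ((PySem.List.pyRange 1 151 1).foldl (fun ans g =>
      if PySem.List.pyGetD pvMuTable g 0 != 0 then
        ans + PySem.List.pyGetD pvMuTable g 0 *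
          (mat.foldl (fun prod row =>
            PySem.Int.mod (prod *
              ((PySem.List.slice row none (some (PySem.List.len (PySem.List.pyGetD mat 0 [])))).foldl
                (fun c v => if PySem.Int.mod v g == 0 then c + 1 else c) 0)) pvMOD) 1)
      else ans) 0) pvMOD

-- ===== PRECONDITION & SPEC =====
-- Pre_ excludes exactly the inputs on which A raises IndexError: an empty matrix (mat[0]) and
-- matrices with a row shorter than the first row (mat[i][j] for j < len(mat[0])).
def Pre_countCoprime (mat : List (List Int)) : Prop :=
  mat ≠ [] ∧ ∀ row ∈ mat, (PySem.List.pyGetD mat 0 []).length ≤ row.length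
instance (mat : List (List Int)) : Decidable (Pre_countCoprime mat) := by
  unfold Pre_countCoprime; infer_instance
def pvWitness_countCoprime : List (List Int) := [[2, 3], [4, 6]]

def Spec_countCoprime (mat : List (List Int)) (out : Int) : Prop := out = countCoprime_alt mat
instance (mat : List (List Int)) (out : Int) : Decidable (Spec_countCoprime mat out) := by
  unfold Spec_countCoprime; infer_instance

-- ===== CLAIM (what is proved, stated in full; the proofs are below) =====
def Claim_equal_countCoprime : Prop := ∀ (mat : List (List Int)), Dom_countCoprime mat → Pre_countCoprime mat → Spec_countCoprime mat (countCoprime mat)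

-- ===== LEMMAS AND PROOFS =====

-- count of multiples of g among the first n entries of a row
def pvCnt (n : Nat) (g : Int) (row : List Int) : Int :=
  (((row.take n).countP (fun v => PySem.Int.mod v g == 0)) : Int)

-- product over all rows, reduced mod pvMOD at each step (what both programs accumulate)
def pvP (mat : List (List Int)) (n : Nat) (g : Int) : Int :=
  mat.foldl (fun a row => PySem.Int.mod (a * pvCnt n g row) pvMOD) 1

-- the final table value dp[g], defined by A's downward recursion over the divisor lattice
def pvF (mat : List (List Int)) (n : Nat) (g : Nat) : Int :=
  if h0g : 0 < g then
    ((PySem.List.pyRange (2 * (g : Int)) 151 (g : Int)).attach).foldl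
      (fun a x => PySem.Int.mod (a - pvF mat n x.1.toNat + pvMOD) pvMOD) (pvP mat n g)
  else 0
termination_by 151 - g
decreasing_by
  have hgz : (0:Int) < (g:Int) := by exact_mod_cast h0g
  have hx := (PySem.List.mem_pyRange_iff_of_pos hgz x.1).1 x.2
  omega

theorem pvF_pos_def (mat : List (List Int)) (n : Nat) (g : Nat) (hg : 0 < g) :
    pvF mat n g =
    ((PySem.List.pyRange (2 * (g : Int)) 151 (g : Int))).foldl
      (fun a g2 => PySem.Int.mod (a - pvF mat n g2.toNat + pvMOD) pvMOD) (pvP mat n g) := by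
  rw [pvF]
  simp [hg, List.foldl_attach]

-- array update/read basics (read index kept nonnegative: Python's negative wraparound never occurs in the ports)
theorem pv_getD_setD (dp : List Int) (i h : Int) (v : Int) (h0 : 0 ≤ i) (h1 : i < (dp.length : Int)) (h2 : 0 ≤ h) :
    PySem.List.pyGetD (PySem.List.pySetD dp i v) h 0 = if h = i then v else PySem.List.pyGetD dp h 0 := by
  rw [PySem.List.pySetD_of_nonneg dp v h0]
  simp only [PySem.List.pyGetD, PySem.List.pyGet?, PySem.List.pyIdx?, List.length_set, if_pos h2]
  by_cases hlt : h < (dp.length : Int)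
  · simp only [if_pos hlt, Option.bind, List.getElem?_set]
    by_cases he : h = i
    · have hti : i.toNat = h.toNat := by omega
      simp [he, hti, if_pos (by omega : i.toNat < dp.length)]
      rw [if_pos (by omega : h.toNat < dp.length)]
      simp
    · have hti : ¬ i.toNat = h.toNat := by omega
      simp [he, hti]
  · have hne : ¬ h = i := by omega
    simp [hlt, hne]

theorem pv_len_setD (dp : List Int) (i : Int) (v : Int) :
    (PySem.List.pySetD dp i v).length = dp.length := PySem.List.length_pySetD _ _ _

-- a loop writing only index g, new value a function of the old value and the loop element
theorem pv_fold_self {β : Type} (L : List β) (φ : Int → β → Int) (g : Int) (hg0 : 0 ≤ g) :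
    ∀ dp : List Int, g < (dp.length : Int) →
      (L.foldl (fun dp x => PySem.List.pySetD dp g (φ (PySem.List.pyGetD dp g 0) x)) dp).length = dp.length ∧
      PySem.List.pyGetD (L.foldl (fun dp x => PySem.List.pySetD dp g (φ (PySem.List.pyGetD dp g 0) x)) dp) g 0
        = L.foldl φ (PySem.List.pyGetD dp g 0) ∧
      ∀ h : Int, 0 ≤ h → h ≠ g → PySem.List.pyGetD (L.foldl (fun dp x => PySem.List.pySetD dp g (φ (PySem.List.pyGetD dp g 0) x)) dp) h 0 = PySem.List.pyGetD dp h 0 := by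
  induction L with
  | nil => intro dp _; exact ⟨rfl, rfl, fun _ _ _ => rfl⟩
  | cons x t ih =>
    intro dp hlen
    simp only [List.foldl_cons]
    have hlen' : g < ((PySem.List.pySetD dp g (φ (PySem.List.pyGetD dp g 0) x)).length : Int) := by
      rw [pv_len_setD]; exact hlen
    obtain ⟨l1, l2, l3⟩ := ih (PySem.List.pySetD dp g (φ (PySem.List.pyGetD dp g 0) x)) hlen'
    refine ⟨by rw [l1, pv_len_setD], ?_, ?_⟩
    · rw [l2, pv_getD_setD dp g g _ hg0 hlen hg0]; simp
    · intro h h0 hh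
      rw [l3 h h0 hh, pv_getD_setD dp g h _ hg0 hlen h0]; simp [hh]

-- a loop writing only index g, new value from the old value and a read at another (nonnegative) index
theorem pv_fold_self_read {β : Type} (L : List β) (idx : β → Int) (φ : Int → Int → Int) (g : Int) (hg0 : 0 ≤ g) :
    ∀ dp : List Int, g < (dp.length : Int) → (∀ x ∈ L, 0 ≤ idx x ∧ idx x ≠ g) →
      (L.foldl (fun dp x => PySem.List.pySetD dp g (φ (PySem.List.pyGetD dp g 0) (PySem.List.pyGetD dp (idx x) 0))) dp).length = dp.length ∧
      PySem.List.pyGetD (L.foldl (fun dp x => PySem.List.pySetD dp g (φ (PySem.List.pyGetD dp g 0) (PySem.List.pyGetD dp (idx x) 0))) dp) g 0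
        = L.foldl (fun a x => φ a (PySem.List.pyGetD dp (idx x) 0)) (PySem.List.pyGetD dp g 0) ∧
      ∀ h : Int, 0 ≤ h → h ≠ g → PySem.List.pyGetD (L.foldl (fun dp x => PySem.List.pySetD dp g (φ (PySem.List.pyGetD dp g 0) (PySem.List.pyGetD dp (idx x) 0))) dp) h 0 = PySem.List.pyGetD dp h 0 := by
  induction L with
  | nil => intro dp _ _; exact ⟨rfl, rfl, fun _ _ _ => rfl⟩
  | cons x t ih =>
    intro dp hlen hidx
    simp only [List.foldl_cons]
    set dp1 := PySem.List.pySetD dp g (φ (PySem.List.pyGetD dp g 0) (PySem.List.pyGetD dp (idx x) 0)) with hdp1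
    have hlen' : g < ((dp1).length : Int) := by rw [hdp1, pv_len_setD]; exact hlen
    obtain ⟨l1, l2, l3⟩ := ih dp1 hlen' (fun y hy => hidx y (List.mem_cons_of_mem _ hy))
    have hunch : ∀ h : Int, 0 ≤ h → h ≠ g → PySem.List.pyGetD dp1 h 0 = PySem.List.pyGetD dp h 0 := by
      intro h h0 hh; rw [hdp1, pv_getD_setD dp g h _ hg0 hlen h0]; simp [hh]
    refine ⟨by rw [l1, hdp1, pv_len_setD], ?_, ?_⟩
    · rw [l2]
      have hgg : PySem.List.pyGetD dp1 g 0 = φ (PySem.List.pyGetD dp g 0) (PySem.List.pyGetD dp (idx x) 0) := by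
        rw [hdp1, pv_getD_setD dp g g _ hg0 hlen hg0]; simp
      rw [hgg]
      exact PySem.List.foldl_congr_mem t _ _ _ (fun a y hy => by
        rw [hunch (idx y) (hidx y (List.mem_cons_of_mem _ hy)).1 (hidx y (List.mem_cons_of_mem _ hy)).2])
    · intro h h0 hh; rw [l3 h h0 hh, hunch h h0 hh]

-- reading inside the first n entries of a row equals reading the truncated row
theorem pv_getD_take (row : List Int) (n : Nat) (j : Int) (h0 : 0 ≤ j) (h1 : j < (n : Int)) :
    PySem.List.pyGetD (row.take n) j 0 = PySem.List.pyGetD row j 0 := by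
  simp only [PySem.List.pyGetD, PySem.List.pyGet?, PySem.List.pyIdx?, List.length_take]
  rw [if_pos h0, if_pos h0]
  by_cases hrl : j < (row.length : Int)
  · rw [if_pos (by omega), if_pos hrl]
    simp only [Option.bind]
    rw [List.getElem?_take]
    simp [if_pos (by omega : j.toNat < n)]
  · rw [if_neg (by omega), if_neg hrl]
    rfl

-- A's inner generator-sum over row indices equals pvCnt
theorem pv_cntA (row : List Int) (n : Nat) (hn : n ≤ row.length) (g : Int) :
    (PySem.List.pyRange 0 (n : Int) 1).foldl (fun s j =>
        if PySem.Int.mod (PySem.List.pyGetD row j 0) g == 0 then s + 1 else s) (0 : Int)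
      = pvCnt n g row := by
  have ht : ((row.take n).length : Int) = (n : Int) := by simp [hn]
  have hcg := PySem.List.foldl_congr_mem (PySem.List.pyRange 0 (n : Int) 1)
    (fun s j => if PySem.Int.mod (PySem.List.pyGetD row j 0) g == 0 then s + 1 else s)
    (fun s j => if PySem.Int.mod (PySem.List.pyGetD (row.take n) j 0) g == 0 then s + 1 else s)
    (0 : Int) ?hcong
  case hcong =>
    intro a j hj
    obtain ⟨hj0, hj1⟩ := PySem.List.mem_pyRange_one.1 hj
    simp only [pv_getD_take row n j hj0 hj1]
  rw [hcg, ← ht, PySem.List.foldl_pyRange_zero_pyGetD' (row.take n) 0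
      (fun s v => if PySem.Int.mod v g == 0 then s + 1 else s) 0,
    PySem.List.foldl_if_add_one]
  simp [pvCnt]

theorem pv_MOD_pos : (0 : Int) < pvMOD := by norm_num [pvMOD]

-- A's step-by-step (a - c + MOD) % MOD chain equals one subtraction followed by one mod
theorem pv_arith (L : List Int) (f : Int → Int) :
    ∀ a : Int, 0 ≤ a → a < pvMOD →
      L.foldl (fun t c => PySem.Int.mod (t - f c + pvMOD) pvMOD) a
        = PySem.Int.mod (a - (L.map f).sum) pvMOD := by
  induction L with
  | nil =>
    intro a h0 h1
    rw [List.foldl_nil, List.map_nil, List.sum_nil, sub_zero,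
      PySem.Int.mod_eq_emod_of_pos pv_MOD_pos, Int.emod_eq_of_lt h0 h1]
  | cons c t ih =>
    intro a h0 h1
    rw [List.foldl_cons, List.map_cons, List.sum_cons,
      ih _ (PySem.Int.mod_nonneg _ pv_MOD_pos) (PySem.Int.mod_lt _ pv_MOD_pos),
      PySem.Int.mod_eq_emod_of_pos pv_MOD_pos, PySem.Int.mod_eq_emod_of_pos pv_MOD_pos,
      PySem.Int.mod_eq_emod_of_pos pv_MOD_pos]
    simp only [pvMOD]
    omega

theorem pv_P_bounds (mat : List (List Int)) (n : Nat) (g : Int) :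
    0 ≤ pvP mat n g ∧ pvP mat n g < pvMOD := by
  rw [pvP]
  have : ∀ (l : List (List Int)) (a : Int), 0 ≤ a → a < pvMOD →
      0 ≤ l.foldl (fun a row => PySem.Int.mod (a * pvCnt n g row) pvMOD) a ∧
      l.foldl (fun a row => PySem.Int.mod (a * pvCnt n g row) pvMOD) a < pvMOD := by
    intro l
    induction l with
    | nil => intro a h0 h1; exact ⟨h0, h1⟩
    | cons r t ih =>
      intro a _ _
      exact ih _ (PySem.Int.mod_nonneg _ pv_MOD_pos) (PySem.Int.mod_lt _ pv_MOD_pos)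
  exact this mat 1 (by norm_num) (by norm_num [pvMOD])

-- the recursive table value as one subtraction of the already-final multiples
theorem pvF_eq (mat : List (List Int)) (n : Nat) (g : Nat) (hg : 0 < g) :
    pvF mat n g = PySem.Int.mod (pvP mat n g -
      ((PySem.List.pyRange (2 * (g : Int)) 151 (g : Int)).map (fun g2 => pvF mat n g2.toNat)).sum) pvMOD := by
  rw [pvF_pos_def mat n g hg]
  exact pv_arith _ _ _ (pv_P_bounds mat n (g : Int)).1 (pv_P_bounds mat n (g : Int)).2

-- effect of one iteration of A's outer loop at value g
theorem pv_A_body (mat : List (List Int))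
    (hpre : ∀ row ∈ mat, (PySem.List.pyGetD mat 0 []).length ≤ row.length)
    (g : Int) (hg1 : 1 ≤ g) (hg2 : g ≤ 150)
    (dp : List Int) (hlen : dp.length = 151)
    (hread : ∀ h : Int, g < h → h ≤ 150 →
      PySem.List.pyGetD dp h 0 = pvF mat (PySem.List.pyGetD mat 0 []).length h.toNat) :
    (List.foldl (fun dp g2 => PySem.List.pySetD dp g (PySem.Int.mod (PySem.List.pyGetD dp g 0 - PySem.List.pyGetD dp g2 0 + pvMOD) pvMOD))
      (List.foldl (fun dp i => PySem.List.pySetD dp g (PySem.Int.mod (PySem.List.pyGetD dp g 0 * List.foldl (fun s j => if PySem.Int.mod (PySem.List.pyGetD (PySem.List.pyGetD mat i []) j 0) g == 0 then s + 1 else s) 0 (PySem.List.pyRange 0 (PySem.List.len (PySem.List.pyGetD mat 0 [])) 1)) pvMOD))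
        (PySem.List.pySetD dp g 1) (PySem.List.pyRange 0 (PySem.List.len mat) 1))
      (PySem.List.pyRange (g * 2) 151 g)).length = 151 ∧
    PySem.List.pyGetD (List.foldl (fun dp g2 => PySem.List.pySetD dp g (PySem.Int.mod (PySem.List.pyGetD dp g 0 - PySem.List.pyGetD dp g2 0 + pvMOD) pvMOD))
      (List.foldl (fun dp i => PySem.List.pySetD dp g (PySem.Int.mod (PySem.List.pyGetD dp g 0 * List.foldl (fun s j => if PySem.Int.mod (PySem.List.pyGetD (PySem.List.pyGetD mat i []) j 0) g == 0 then s + 1 else s) 0 (PySem.List.pyRange 0 (PySem.List.len (PySem.List.pyGetD mat 0 [])) 1)) pvMOD))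
        (PySem.List.pySetD dp g 1) (PySem.List.pyRange 0 (PySem.List.len mat) 1))
      (PySem.List.pyRange (g * 2) 151 g)) g 0 = pvF mat (PySem.List.pyGetD mat 0 []).length g.toNat ∧
    ∀ h : Int, 0 ≤ h → h ≠ g → PySem.List.pyGetD (List.foldl (fun dp g2 => PySem.List.pySetD dp g (PySem.Int.mod (PySem.List.pyGetD dp g 0 - PySem.List.pyGetD dp g2 0 + pvMOD) pvMOD))
      (List.foldl (fun dp i => PySem.List.pySetD dp g (PySem.Int.mod (PySem.List.pyGetD dp g 0 * List.foldl (fun s j => if PySem.Int.mod (PySem.List.pyGetD (PySem.List.pyGetD mat i []) j 0) g == 0 then s + 1 else s) 0 (PySem.List.pyRange 0 (PySem.List.len (PySem.List.pyGetD mat 0 [])) 1)) pvMOD))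
        (PySem.List.pySetD dp g 1) (PySem.List.pyRange 0 (PySem.List.len mat) 1))
      (PySem.List.pyRange (g * 2) 151 g)) h 0 = PySem.List.pyGetD dp h 0 := by
  have hg0 : (0 : Int) ≤ g := by omega
  set nN := (PySem.List.pyGetD mat 0 ([] : List Int)).length with hnN
  set dp1 := PySem.List.pySetD dp g 1 with hdp1
  have hlen1 : dp1.length = 151 := by rw [hdp1, pv_len_setD, hlen]
  have hget1 : PySem.List.pyGetD dp1 g 0 = 1 := by
    rw [hdp1, pv_getD_setD dp g g 1 hg0 (by omega) hg0, if_pos rfl]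
  have hunch1 : ∀ h : Int, 0 ≤ h → h ≠ g → PySem.List.pyGetD dp1 h 0 = PySem.List.pyGetD dp h 0 := by
    intro h h0 hh
    rw [hdp1, pv_getD_setD dp g h 1 hg0 (by omega) h0, if_neg hh]
  obtain ⟨hlen2, hget2, hunch2⟩ := pv_fold_self (PySem.List.pyRange 0 (PySem.List.len mat) 1)
    (fun a i => PySem.Int.mod (a * List.foldl (fun s j => if PySem.Int.mod (PySem.List.pyGetD (PySem.List.pyGetD mat i []) j 0) g == 0 then s + 1 else s) 0 (PySem.List.pyRange 0 (PySem.List.len (PySem.List.pyGetD mat 0 [])) 1)) pvMOD)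
    g hg0 dp1 (by omega)
  rw [hget1] at hget2
  have hprod : List.foldl
      (fun a i => PySem.Int.mod (a * List.foldl (fun s j => if PySem.Int.mod (PySem.List.pyGetD (PySem.List.pyGetD mat i []) j 0) g == 0 then s + 1 else s) 0 (PySem.List.pyRange 0 (PySem.List.len (PySem.List.pyGetD mat 0 [])) 1)) pvMOD)
      1 (PySem.List.pyRange 0 (PySem.List.len mat) 1) = pvP mat nN g := by
    rw [PySem.List.foldl_pyRange_zero_pyGetD mat []
      (fun a row => PySem.Int.mod (a * List.foldl (fun s j => if PySem.Int.mod (PySem.List.pyGetD row j 0) g == 0 then s + 1 else s) 0 (PySem.List.pyRange 0 (PySem.List.len (PySem.List.pyGetD mat 0 [])) 1)) pvMOD) 1,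
      pvP]
    refine PySem.List.foldl_congr_mem mat _ _ 1 (fun a row hrow => ?_)
    have : PySem.List.len (PySem.List.pyGetD mat 0 ([] : List Int)) = ((nN : Nat) : Int) := by
      simp [hnN]
    rw [this]
    simp only [pv_cntA row nN (hpre row hrow) g]
  rw [hprod] at hget2
  have hmem : ∀ x ∈ PySem.List.pyRange (g * 2) 151 g, 0 ≤ x ∧ x ≠ g := by
    intro x hx
    obtain ⟨hx1, hx2, _⟩ := (PySem.List.mem_pyRange_iff_of_pos (by omega) x).1 hx
    constructor <;> omega
  obtain ⟨hlen3, hget3, hunch3⟩ := pv_fold_self_read (PySem.List.pyRange (g * 2) 151 g)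
    (fun g2 => g2) (fun a b => PySem.Int.mod (a - b + pvMOD) pvMOD) g hg0
    (List.foldl (fun dp i => PySem.List.pySetD dp g (PySem.Int.mod (PySem.List.pyGetD dp g 0 * List.foldl (fun s j => if PySem.Int.mod (PySem.List.pyGetD (PySem.List.pyGetD mat i []) j 0) g == 0 then s + 1 else s) 0 (PySem.List.pyRange 0 (PySem.List.len (PySem.List.pyGetD mat 0 [])) 1)) pvMOD)) dp1 (PySem.List.pyRange 0 (PySem.List.len mat) 1)) (by rw [hlen2, hlen1]; omega) hmem
  refine ⟨by rw [hlen3, hlen2, hlen1], ?_, ?_⟩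
  · rw [hget3, hget2]
    have hcong := PySem.List.foldl_congr_mem (PySem.List.pyRange (g * 2) 151 g)
      (fun a g2 => PySem.Int.mod (a - PySem.List.pyGetD (List.foldl (fun dp i => PySem.List.pySetD dp g (PySem.Int.mod (PySem.List.pyGetD dp g 0 * List.foldl (fun s j => if PySem.Int.mod (PySem.List.pyGetD (PySem.List.pyGetD mat i []) j 0) g == 0 then s + 1 else s) 0 (PySem.List.pyRange 0 (PySem.List.len (PySem.List.pyGetD mat 0 [])) 1)) pvMOD)) dp1 (PySem.List.pyRange 0 (PySem.List.len mat) 1)) g2 0 + pvMOD) pvMOD)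
      (fun a g2 => PySem.Int.mod (a - pvF mat nN g2.toNat + pvMOD) pvMOD)
      (pvP mat nN g) ?hc
    case hc =>
      intro a g2 hg2m
      obtain ⟨hx1, hx2, _⟩ := (PySem.List.mem_pyRange_iff_of_pos (by omega) g2).1 hg2m
      have h0g2 : (0 : Int) ≤ g2 := by omega
      have hne : g2 ≠ g := by omega
      simp only [hunch2 g2 h0g2 hne, hunch1 g2 h0g2 hne, hread g2 (by omega : g < g2) (by omega : g2 ≤ 150)]
    rw [hcong, pvF_pos_def mat nN g.toNat (by omega)]
    have h1 : ((g.toNat : Nat) : Int) = g := Int.toNat_of_nonneg hg0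
    rw [h1, mul_comm 2 g]
  · intro h h0 hh
    rw [hunch3 h h0 hh, hunch2 h h0 hh, hunch1 h h0 hh]

theorem pv_A_loop (mat : List (List Int))
    (hpre : ∀ row ∈ mat, (PySem.List.pyGetD mat 0 []).length ≤ row.length) :
    ∀ G : Nat, G ≤ 150 → ∀ dp : List Int, dp.length = 151 →
    (∀ h : Int, (G : Int) < h → h ≤ 150 →
      PySem.List.pyGetD dp h 0 = pvF mat (PySem.List.pyGetD mat 0 []).length h.toNat) →
    (List.foldl (fun dp g => List.foldl (fun dp g2 => PySem.List.pySetD dp g (PySem.Int.mod (PySem.List.pyGetD dp g 0 - PySem.List.pyGetD dp g2 0 + pvMOD) pvMOD))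
      (List.foldl (fun dp i => PySem.List.pySetD dp g (PySem.Int.mod (PySem.List.pyGetD dp g 0 * List.foldl (fun s j => if PySem.Int.mod (PySem.List.pyGetD (PySem.List.pyGetD mat i []) j 0) g == 0 then s + 1 else s) 0 (PySem.List.pyRange 0 (PySem.List.len (PySem.List.pyGetD mat 0 [])) 1)) pvMOD))
        (PySem.List.pySetD dp g 1) (PySem.List.pyRange 0 (PySem.List.len mat) 1))
      (PySem.List.pyRange (g * 2) 151 g)) dp (PySem.List.pyRange (G : Int) 0 (-1))).length = 151 ∧
    ∀ h : Int, 0 ≤ h → PySem.List.pyGetD (List.foldl (fun dp g => List.foldl (fun dp g2 => PySem.List.pySetD dp g (PySem.Int.mod (PySem.List.pyGetD dp g 0 - PySem.List.pyGetD dp g2 0 + pvMOD) pvMOD))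
      (List.foldl (fun dp i => PySem.List.pySetD dp g (PySem.Int.mod (PySem.List.pyGetD dp g 0 * List.foldl (fun s j => if PySem.Int.mod (PySem.List.pyGetD (PySem.List.pyGetD mat i []) j 0) g == 0 then s + 1 else s) 0 (PySem.List.pyRange 0 (PySem.List.len (PySem.List.pyGetD mat 0 [])) 1)) pvMOD))
        (PySem.List.pySetD dp g 1) (PySem.List.pyRange 0 (PySem.List.len mat) 1))
      (PySem.List.pyRange (g * 2) 151 g)) dp (PySem.List.pyRange (G : Int) 0 (-1))) h 0
      = if 1 ≤ h ∧ h ≤ (G : Int) then pvF mat (PySem.List.pyGetD mat 0 []).length h.toNat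
        else PySem.List.pyGetD dp h 0 := by
  intro G
  induction G with
  | zero =>
    intro _ dp hlen _
    rw [PySem.List.pyRange_neg_one_eq_nil (by norm_num)]
    exact ⟨hlen, fun h _ => by rw [List.foldl_nil, if_neg (by omega)]⟩
  | succ G ih =>
    intro hG dp hlen hread
    have hcons : PySem.List.pyRange ((G + 1 : Nat) : Int) 0 (-1)
        = ((G + 1 : Nat) : Int) :: PySem.List.pyRange ((G : Nat) : Int) 0 (-1) := by
      rw [PySem.List.pyRange_neg_one_cons (by push_cast; omega)]
      congr 1
      push_cast; ring
    rw [hcons, List.foldl_cons]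
    obtain ⟨b1, b2, b3⟩ := pv_A_body mat hpre ((G + 1 : Nat) : Int) (by push_cast; omega)
      (by push_cast; omega) dp hlen (fun h h1 h2 => hread h (by push_cast at h1 ⊢; omega) h2)
    obtain ⟨l1, l2⟩ := ih (by omega) _ b1 (by
      intro h h1 h2
      by_cases he : h = ((G + 1 : Nat) : Int)
      · rw [he, b2]
      · rw [b3 h (by omega) he, hread h (by push_cast; omega) h2])
    refine ⟨l1, fun h h0 => ?_⟩
    rw [l2 h h0]
    by_cases hc : 1 ≤ h ∧ h ≤ (G : Int)
    · rw [if_pos hc, if_pos (by push_cast; omega)]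
    · rw [if_neg hc]
      by_cases he : h = ((G + 1 : Nat) : Int)
      · rw [he, if_pos (by push_cast; omega)]
        have ht : (((G + 1 : Nat) : Int)).toNat = G + 1 := by push_cast; omega
        rw [b2]
      · rw [if_neg (by push_cast at he ⊢; omega), b3 h h0 he]

theorem pv_A_final (mat : List (List Int))
    (hpre : ∀ row ∈ mat, (PySem.List.pyGetD mat 0 []).length ≤ row.length) :
    countCoprime mat = pvF mat (PySem.List.pyGetD mat 0 []).length 1 := by
  simp only [countCoprime]
  obtain ⟨l1, l2⟩ := pv_A_loop mat hpre 150 (by norm_num) (List.replicate 151 0)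
    (by simp) (fun h h1 h2 => by norm_num at h1 h2; omega)
  have h150 : ((150 : Nat) : Int) = (150 : Int) := by norm_num
  rw [h150] at l2
  rw [l2 1 (by norm_num), if_pos (by norm_num)]
  norm_num

-- ========== B side: Möbius inversion ==========

-- the sieve's output as a literal (checked by kernel evaluation)
def pvMuLit : List Int := [0, 1, -1, -1, 0, -1, 1, -1, 0, 0, 1, -1, 0, -1, 1, 1, 0, -1, 0, -1, 0, 1, 1, -1, 0, 0, 1, 0, 0, -1, -1, -1, 0, 1, 1, 1, 0, -1, 1, 1, 0, -1, -1, -1, 0, 0, 1, -1, 0, 0, 0, 1, 0, -1, 0, 1, 0, 1, 1, -1, 0, -1, 1, 0, 0, 1, -1, -1, 0, 1, -1, -1, 0, -1, 1, 0, 0, 1, -1, -1, 0, 0, 1, -1, 0, 1, 1, 1, 0, -1, 0, 1, 0, 1, 1, 1, 0, -1, 0, 0, 0, -1, -1, -1, 0, -1, 1, -1, 0, -1, -1, 1, 0, -1, -1, 1, 0, 0, 1, 1, 0, 0, 1, 1, 0, 0, 0, -1, 0, 1, -1, -1, 0, 1, 1, 0, 0, -1, -1, -1, 0, 1, 1, 1,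 0, 1, 1, 0, 0, -1, 0]

set_option maxRecDepth 100000 in
theorem pv_mu_tab : pvMuTable = pvMuLit := by decide

def muF (t : Nat) : Int := PySem.List.pyGetD pvMuLit (t : Int) 0

set_option maxRecDepth 100000 in
theorem pv_mu_one : muF 1 = 1 := by decide

set_option maxRecDepth 1000000 in
theorem pv_mu_div : ∀ s ∈ Finset.Icc 2 150, ∑ d ∈ Nat.divisors s, muF d = 0 := by decide

-- the truncated Möbius sum that both programs compute (mod pvMOD)
def pvS (mat : List (List Int)) (nn : Nat) (g : Nat) : Int :=
  ∑ t ∈ Finset.Icc 1 (150 / g), muF t * pvP mat nn ((g * t : Nat) : Int)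

-- sums over List.range as Finset sums
theorem pv_sum_list_range (n : Nat) (f : Nat → Int) :
    ((List.range n).map f).sum = ∑ k ∈ Finset.range n, f k := by
  induction n with
  | zero => simp
  | succ m ih =>
    rw [List.range_succ, List.map_append, List.sum_append, Finset.sum_range_succ, ih]
    simp

-- the multiples range of A's inner lattice loop, as a Finset sum
theorem pv_range_mult_sum (G : Nat) (h1 : 1 ≤ G) (h2 : G ≤ 150) (F : Nat → Int) :
    ((PySem.List.pyRange (2 * (G : Int)) 151 (G : Int)).map (fun g2 => F g2.toNat)).sum
      = ∑ t ∈ Finset.Icc 2 (150 / G), F (G * t) := by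
  have hG0 : (0 : Int) < (G : Int) := by exact_mod_cast h1
  rw [PySem.List.pyRange_of_pos _ _ hG0]
  by_cases h76 : 76 ≤ G
  · have hnlt : ¬ (2 * (G : Int) < 151) := by push_cast; omega
    rw [if_neg hnlt]
    have hK : 150 / G = 1 := by
      have hlt2 : 150 / G < 2 := (Nat.div_lt_iff_lt_mul (by omega)).2 (by omega)
      have hge1 : 1 ≤ 150 / G := (Nat.one_le_div_iff (by omega)).2 h2
      omega
    rw [hK]
    simp [Finset.Icc_eq_empty_of_lt]
  · have h75 : G ≤ 75 := by omega
    rw [if_pos (by push_cast; omega)]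
    have hnum : (151 - 2 * (G : Int) + (G : Int) - 1) = ((150 - G : Nat) : Int) := by omega
    have hc : ((151 - 2 * (G : Int) + (G : Int) - 1) / (G : Int)).toNat = (150 - G) / G := by
      rw [hnum, show ((150 - G : Nat) : Int) / ((G : Nat) : Int) = (((150 - G) / G : Nat) : Int) from by
        exact_mod_cast rfl]
      exact Int.toNat_natCast _
    rw [hc]
    have hc2 : (150 - G) / G = 150 / G - 1 := by
      have := Nat.div_eq_sub_div (show 0 < G by omega) (show G ≤ 150 by omega)
      omega
    rw [hc2, List.map_map, pv_sum_list_range]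
    refine Finset.sum_nbij' (fun k => k + 2) (fun t => t - 2) ?_ ?_ ?_ ?_ ?_
    · intro k hk
      simp only [Finset.mem_range] at hk
      simp only [Finset.mem_Icc]
      omega
    · intro t ht
      simp only [Finset.mem_Icc] at ht
      simp only [Finset.mem_range]
      omega
    · intro k _; show k + 2 - 2 = k; omega
    · intro t ht
      simp only [Finset.mem_Icc] at ht
      show t - 2 + 2 = t
      omega
    · intro k _
      simp only [Function.comp]
      rw [show (2 * (G : Int) + (G : Int) * (k : Int)) = ((G * (k + 2) : Nat) : Int) from by
        push_cast; ring, Int.toNat_natCast]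

-- the core Möbius-inversion identity on the truncated lattice
theorem pv_conv (mat : List (List Int)) (nn G : Nat) (h1 : 1 ≤ G) (h2 : G ≤ 150) :
    pvP mat nn (G : Int) - ∑ k ∈ Finset.Icc 2 (150 / G), pvS mat nn (G * k)
      = pvS mat nn G := by
  have hswap : ∑ k ∈ Finset.Icc 2 (150 / G), pvS mat nn (G * k)
      = ∑ s ∈ Finset.Icc 2 (150 / G),
          (∑ m ∈ (Nat.divisors s).erase s, muF m) * pvP mat nn ((G * s : Nat) : Int) := by
    simp only [pvS, Finset.sum_mul]
    rw [Finset.sum_sigma' (Finset.Icc 2 (150 / G)) (fun k => Finset.Icc 1 (150 / (G * k)))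
        (fun k m => muF m * pvP mat nn ((G * k * m : Nat) : Int)),
      Finset.sum_sigma' (Finset.Icc 2 (150 / G)) (fun s => (Nat.divisors s).erase s)
        (fun s m => muF m * pvP mat nn ((G * s : Nat) : Int))]
    refine Finset.sum_nbij' (fun x => ⟨x.1 * x.2, x.2⟩) (fun x => ⟨x.1 / x.2, x.2⟩) ?_ ?_ ?_ ?_ ?_
    · rintro ⟨k, m⟩ hx
      simp only [Finset.mem_sigma, Finset.mem_Icc] at hx
      obtain ⟨⟨hk2, hkK⟩, hm1, hmB⟩ := hx
      have hGk : 0 < G * k := by positivity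
      have h150 : m * (G * k) ≤ 150 := (Nat.le_div_iff_mul_le hGk).1 hmB
      simp only [Finset.mem_sigma, Finset.mem_Icc, Finset.mem_erase, Nat.mem_divisors]
      refine ⟨⟨by nlinarith, (Nat.le_div_iff_mul_le (show 0 < G by omega)).2 (by nlinarith)⟩,
        fun he => by nlinarith [he.symm.le, Nat.lt_of_lt_of_le (show m < 2 * m by omega) (Nat.mul_le_mul_right m hk2)],
        dvd_mul_left m k, by positivity⟩
    · rintro ⟨s, m⟩ hx
      simp only [Finset.mem_sigma, Finset.mem_Icc, Finset.mem_erase, Nat.mem_divisors] at hx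
      obtain ⟨⟨hs2, hsK⟩, hne, hdvd, hs0⟩ := hx
      have hm0 : 0 < m := Nat.pos_of_dvd_of_pos hdvd (by omega)
      have hms : m < s := lt_of_le_of_ne (Nat.le_of_dvd (by omega) hdvd) hne
      have hk : s / m * m = s := Nat.div_mul_cancel hdvd
      simp only [Finset.mem_sigma, Finset.mem_Icc]
      have hq2 : 2 ≤ s / m := by nlinarith [Nat.div_le_self s m]
      refine ⟨⟨hq2, le_trans (Nat.div_le_self s m) hsK⟩, by omega, ?_⟩
      have hsG : s * G ≤ 150 := (Nat.le_div_iff_mul_le (show 0 < G by omega)).1 hsK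
      have hmul : m * (G * (s / m)) = G * s := by
        calc m * (G * (s / m)) = G * (s / m * m) := by ring
        _ = G * s := by rw [hk]
      have hGs : G * s = s * G := Nat.mul_comm G s
      exact (Nat.le_div_iff_mul_le (Nat.mul_pos (by omega) (by omega))).2 (by omega)
    · rintro ⟨k, m⟩ hx
      simp only [Finset.mem_sigma, Finset.mem_Icc] at hx
      have hm0 : 0 < m := by omega
      simp only [Sigma.mk.injEq]
      exact ⟨Nat.eq_of_mul_eq_mul_right hm0 (by rw [Nat.div_mul_cancel (dvd_mul_left m k)]), HEq.rfl⟩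
    · rintro ⟨s, m⟩ hx
      simp only [Finset.mem_sigma, Finset.mem_Icc, Finset.mem_erase, Nat.mem_divisors] at hx
      obtain ⟨⟨hs2, hsK⟩, hne, hdvd, hs0⟩ := hx
      simp only [Sigma.mk.injEq]
      exact ⟨Nat.div_mul_cancel hdvd, HEq.rfl⟩
    · rintro ⟨k, m⟩ _
      rw [Nat.mul_assoc]
  rw [hswap]
  have hrw : ∀ s ∈ Finset.Icc 2 (150 / G),
      (∑ m ∈ (Nat.divisors s).erase s, muF m) * pvP mat nn ((G * s : Nat) : Int)
        = -(muF s * pvP mat nn ((G * s : Nat) : Int)) := by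
    intro s hs
    simp only [Finset.mem_Icc] at hs
    have hs0 : s ≠ 0 := by omega
    have hsum := Finset.add_sum_erase (Nat.divisors s) muF (Nat.mem_divisors_self s hs0)
    have hz := pv_mu_div s (Finset.mem_Icc.2 ⟨hs.1, le_trans hs.2 (Nat.div_le_self 150 G)⟩)
    have he : ∑ m ∈ (Nat.divisors s).erase s, muF m = -muF s := by linarith
    rw [he]; ring
  rw [Finset.sum_congr rfl hrw]
  have hins : Finset.Icc 1 (150 / G) = insert 1 (Finset.Icc 2 (150 / G)) := by
    have hK1 : 1 ≤ 150 / G := (Nat.one_le_div_iff (by omega)).2 h2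
    ext x
    simp only [Finset.mem_Icc, Finset.mem_insert]
    omega
  rw [pvS, hins, Finset.sum_insert (by simp), pv_mu_one, Nat.mul_one]
  simp only [Finset.sum_neg_distrib, one_mul]
  ring

-- A's dp value equals the truncated Möbius sum, by downward induction on the lattice
theorem pv_main (mat : List (List Int)) (nn : Nat) :
    ∀ (fuel G : Nat), 151 - G ≤ fuel → 1 ≤ G → G ≤ 150 →
      pvF mat nn G = PySem.Int.mod (pvS mat nn G) pvMOD := by
  intro fuel
  induction fuel with
  | zero => intro G hf h1 h2; omega
  | succ f ih =>
    intro G hf h1 h2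
    rw [pvF_eq mat nn G (by omega), pv_range_mult_sum G h1 h2 (pvF mat nn)]
    have hsum : ∑ t ∈ Finset.Icc 2 (150 / G), pvF mat nn (G * t)
        = ∑ t ∈ Finset.Icc 2 (150 / G), PySem.Int.mod (pvS mat nn (G * t)) pvMOD := by
      refine Finset.sum_congr rfl (fun t ht => ?_)
      simp only [Finset.mem_Icc] at ht
      have hGt2 : G * 2 ≤ G * t := Nat.mul_le_mul_left G ht.1
      have hGt150 : G * t ≤ 150 := by
        have h' := (Nat.le_div_iff_mul_le (show 0 < G by omega)).1 ht.2
        have hcm : G * t = t * G := Nat.mul_comm G t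
        omega
      exact ih (G * t) (by omega) (by omega) hGt150
    rw [hsum]
    simp only [PySem.Int.mod_eq_emod_of_pos pv_MOD_pos]
    rw [Int.sub_emod, ← Finset.sum_int_mod, ← Int.sub_emod, pv_conv mat nn G h1 h2]

-- one mapped term of B's outer loop
theorem pv_B_term (mat : List (List Int)) (nn : Nat) (g : Int) (h1 : 1 ≤ g) :
    (if PySem.List.pyGetD pvMuLit g 0 != 0 then PySem.List.pyGetD pvMuLit g 0 * pvP mat nn g else 0)
      = muF g.toNat * pvP mat nn g := by
  have hc : ((g.toNat : Nat) : Int) = g := Int.toNat_of_nonneg (by omega)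
  unfold muF
  rw [hc]
  by_cases h : PySem.List.pyGetD pvMuLit g 0 = 0
  · simp [h]
  · simp [h]

theorem pv_foldl_if_add {β : Type} (l : List β) (p : β → Bool) (w : β → Int) :
    ∀ a : Int, l.foldl (fun a g => if p g then a + w g else a) a
      = a + (l.map (fun g => if p g then w g else 0)).sum := by
  induction l with
  | nil => intro a; simp
  | cons x t ih =>
    intro a
    simp only [List.foldl_cons, List.map_cons, List.sum_cons]
    by_cases h : p x
    · simp only [if_pos h, ih]; ring
    · simp only [if_neg h, ih]; ring

theorem pv_B_final (mat : List (List Int)) :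
    countCoprime_alt mat = PySem.Int.mod (pvS mat (PySem.List.pyGetD mat 0 []).length 1) pvMOD := by
  simp only [countCoprime_alt, pv_mu_tab]
  rw [pv_foldl_if_add (PySem.List.pyRange 1 151 1)
      (fun g => PySem.List.pyGetD pvMuLit g 0 != 0)
      (fun g => PySem.List.pyGetD pvMuLit g 0 *
        (mat.foldl (fun prod row =>
          PySem.Int.mod (prod *
            ((PySem.List.slice row none (some (PySem.List.len (PySem.List.pyGetD mat 0 [])))).foldl
              (fun c v => if PySem.Int.mod v g == 0 then c + 1 else c) 0)) pvMOD) 1)) 0,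
    zero_add]
  refine congrArg (fun x => PySem.Int.mod x pvMOD) ?_
  have hterm : ∀ g ∈ PySem.List.pyRange 1 151 1,
      (if PySem.List.pyGetD pvMuLit g 0 != 0 then
        PySem.List.pyGetD pvMuLit g 0 *
          (mat.foldl (fun prod row =>
            PySem.Int.mod (prod *
              ((PySem.List.slice row none (some (PySem.List.len (PySem.List.pyGetD mat 0 [])))).foldl
                (fun c v => if PySem.Int.mod v g == 0 then c + 1 else c) 0)) pvMOD) 1)
      else 0)
      = muF g.toNat * pvP mat (PySem.List.pyGetD mat 0 []).length g := by
    intro g hg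
    obtain ⟨hg1, hg2⟩ := PySem.List.mem_pyRange_one.1 hg
    have hprod : mat.foldl (fun prod row =>
        PySem.Int.mod (prod *
          ((PySem.List.slice row none (some (PySem.List.len (PySem.List.pyGetD mat 0 [])))).foldl
            (fun c v => if PySem.Int.mod v g == 0 then c + 1 else c) 0)) pvMOD) 1
        = pvP mat (PySem.List.pyGetD mat 0 []).length g := by
      rw [pvP]
      refine PySem.List.foldl_congr_mem mat _ _ 1 (fun a row _ => ?_)
      rw [PySem.List.len_eq, PySem.List.slice_to_natCast, PySem.List.foldl_if_add_one, zero_add,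
        pvCnt]
    rw [hprod]
    exact pv_B_term mat (PySem.List.pyGetD mat 0 []).length g hg1
  rw [List.map_congr_left hterm, PySem.List.pyRange_one 1 151,
    show ((151 : Int) - 1).toNat = 150 from by decide, List.map_map, pv_sum_list_range]
  rw [pvS, Nat.div_one]
  refine Finset.sum_nbij' (fun k => k + 1) (fun t => t - 1) ?_ ?_ ?_ ?_ ?_
  · intro k hk
    simp only [Finset.mem_range] at hk
    simp only [Finset.mem_Icc]
    omega
  · intro t ht
    simp only [Finset.mem_Icc] at ht
    simp only [Finset.mem_range]
    omega
  · intro k _; show k + 1 - 1 = k; omega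
  · intro t ht
    simp only [Finset.mem_Icc] at ht
    show t - 1 + 1 = t
    omega
  · intro k _
    simp only [Function.comp]
    rw [show ((1 : Int) + (k : Int)).toNat = k + 1 from by omega,
      show ((1 * (k + 1) : Nat) : Int) = 1 + (k : Int) from by push_cast; ring]

-- ===== VERDICT (by name: the statement is the Claim_ definition above) =====
theorem countCoprime_spec : Claim_equal_countCoprime := by
  intro mat _ hpre
  unfold Spec_countCoprime
  rw [pv_A_final mat hpre.2,
    pv_main mat (PySem.List.pyGetD mat 0 []).length 151 1 (by omega) (by omega) (by omega),
    pv_B_final mat]
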